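-- pv_equiv track=rewrite | github.com/ykirnev/ykirnev | Python/Yandex_open_algs_6/3 contest/G_Queue_market.py | func
-- ===== SOURCE A (Python) =====
-- from collections import deque
--
-- def func(n, b, ars):
--     queue = deque()
--     total_t = 0
--     for mn in range(n):
--         if ars[mn] > 0:
--             queue.append((mn + 1, ars[mn]))
--         served = 0
--         while queue and served < b:
--             entry_time, num_clients = queue.popleft()
--             to_serve = min(num_clients, b - served)
--             served += to_serve
--             total_t += to_serve * (mn + 2 - entry_time)
--             if num_clients > to_serve:
--                 queue.appendleft((entry_time, num_clients - to_serve))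
--
--     while queue:
--         entry_time, num_clients = queue.popleft()
--         total_t += num_clients * (n + 2 - entry_time)
--
--     return total_t
-- ===== SOURCE B (Python) =====
-- def func(n, b, ars):
--     # Per-group accumulation with two scalars instead of a per-minute deque simulation.
--     total = 0
--     minute = 1   # current service minute
--     used = 0     # clients already served during `minute`
--     for i in range(n):
--         c = ars[i]
--         if c <= 0:
--             continue
--         a = i + 1  # arrival minute of this group
--         if minute < a:
--             minute = a
--             used = 0
--         while c > 0:
--             if minute > n or b <= 0:
--                 # no capacity left within the n minutes: dumped at minute n+1
--                 total += c * (n + 2 - a)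
--                 break
--             take = min(c, b - used)
--             total += take * (minute + 1 - a)
--             c -= take
--             used += take
--             if used == b:
--                 minute += 1
--                 used = 0
--     return total
-- ===== Notes on version B (the rewrite author's own statement) =====
-- stated objective: alternative
-- what changed: Replaces the per-minute deque simulation (append/popleft/appendleft per minute) with a per-group accumulation over two scalars (current service minute, clients already served that minute), charging each group's wait as it is scheduled and dumping unservable clients at minute n+1.
import Mathlib
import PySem

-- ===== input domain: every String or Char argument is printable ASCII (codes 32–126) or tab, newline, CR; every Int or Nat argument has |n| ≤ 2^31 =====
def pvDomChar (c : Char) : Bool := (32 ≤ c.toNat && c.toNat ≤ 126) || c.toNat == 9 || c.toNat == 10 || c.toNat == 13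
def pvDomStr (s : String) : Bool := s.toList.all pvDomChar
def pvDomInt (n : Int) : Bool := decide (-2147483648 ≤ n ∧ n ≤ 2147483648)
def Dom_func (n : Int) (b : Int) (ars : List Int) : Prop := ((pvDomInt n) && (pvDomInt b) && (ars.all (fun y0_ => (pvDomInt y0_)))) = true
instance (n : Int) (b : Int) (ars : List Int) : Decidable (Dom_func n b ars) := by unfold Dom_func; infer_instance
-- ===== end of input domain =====

-- B replaces A's per-minute deque simulation by a per-group accumulation over two
-- scalars (current service minute, clients served that minute); equal cost, no queue.

-- ===== PORT A =====
-- inner `while queue and served < b` loop of A; returns (queue, total_t)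
def serveA (b : Int) (mn : Int) : List (Int × Int) → Int → Int → List (Int × Int) × Int
  | [], _, total => ([], total)
  | (e, c) :: rest, served, total =>
    if served < b then
      let t := min c (b - served)
      let total' := total + t * (mn + 2 - e)
      if c > t then
        -- appendleft of (e, c - t); the next loop test has served = b, so the loop exits
        ((e, c - t) :: rest, total')
      else serveA b mn rest (served + t) total'
    else ((e, c) :: rest, total)

def func (n : Int) (b : Int) (ars : List Int) : Int :=
  let r := (PySem.List.pyRange 0 n 1).foldl
    (fun (st : List (Int × Int) × Int) (mn : Int) =>
      let a := (PySem.List.pyGet? ars mn).getD 0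
      let q := if a > 0 then st.1 ++ [(mn + 1, a)] else st.1
      serveA b mn q 0 st.2)
    ([], 0)
  r.1.foldl (fun acc p => acc + p.2 * (n + 2 - p.1)) r.2

-- ===== PORT B =====
-- inner `while c > 0` loop of B; returns (total, minute, used)
def serveB (n b a : Int) (c minute used total : Int) : Int × Int × Int :=
  if hc : 0 < c then
    if minute > n ∨ b ≤ 0 then (total + c * (n + 2 - a), minute, used)
    else
      let t := min c (b - used)
      if ht : 0 < t then
        if used + t = b then serveB n b a (c - t) (minute + 1) 0 (total + t * (minute + 1 - a))
        else serveB n b a (c - t) minute (used + t) (total + t * (minute + 1 - a))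
      else (total, minute, used)  -- totality guard; unreachable from func_alt (there 0 < take always)
  else (total, minute, used)
termination_by c.toNat
decreasing_by all_goals omega

def func_alt (n : Int) (b : Int) (ars : List Int) : Int :=
  ((PySem.List.pyRange 0 n 1).foldl
    (fun (st : Int × Int × Int) (i : Int) =>
      let c := (PySem.List.pyGet? ars i).getD 0
      if c ≤ 0 then st
      else
        let a := i + 1
        let m := if st.2.1 < a then a else st.2.1
        let u := if st.2.1 < a then 0 else st.2.2
        serveB n b a c m u st.1)
    (0, 1, 0)).1

-- ===== PRECONDITION & SPEC =====
-- A (and B) raise IndexError when ars has fewer than n elements; excluded.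
def Pre_func (n : Int) (b : Int) (ars : List Int) : Prop := n ≤ (ars.length : Int)
instance (n : Int) (b : Int) (ars : List Int) : Decidable (Pre_func n b ars) := by unfold Pre_func; infer_instance
def pvWitness_func : Int × Int × List Int := (3, 2, [3, 0, 4])

def Spec_func (n : Int) (b : Int) (ars : List Int) (out : Int) : Prop := out = func_alt n b ars
instance (n : Int) (b : Int) (ars : List Int) (out : Int) : Decidable (Spec_func n b ars out) := by unfold Spec_func; infer_instance

-- ===== CLAIM (what is proved, stated in full; the proofs are below) =====
def Claim_equal_func : Prop := ∀ (n : Int) (b : Int) (ars : List Int), Dom_func n b ars → Pre_func n b ars → Spec_func n b ars (func n b ars)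

-- ===== LEMMAS AND PROOFS =====

-- proof helpers: named copies of the two fold steps, and the simulation machinery
def stepA (b : Int) (ars : List Int) (st : List (Int × Int) × Int) (mn : Int) : List (Int × Int) × Int :=
  let a := (PySem.List.pyGet? ars mn).getD 0
  let q := if a > 0 then st.1 ++ [(mn + 1, a)] else st.1
  serveA b mn q 0 st.2

def stepB (n b : Int) (ars : List Int) (st : Int × Int × Int) (i : Int) : Int × Int × Int :=
  let c := (PySem.List.pyGet? ars i).getD 0
  if c ≤ 0 then st
  else
    let a := i + 1
    let m := if st.2.1 < a then a else st.2.1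
    let u := if st.2.1 < a then 0 else st.2.2
    serveB n b a c m u st.1

def foldA (b : Int) (ars : List Int) (m : Int) : List (Int × Int) × Int :=
  (PySem.List.pyRange 0 m 1).foldl (stepA b ars) ([], 0)

def foldB (n b : Int) (ars : List Int) (m : Int) : Int × Int × Int :=
  (PySem.List.pyRange 0 m 1).foldl (stepB n b ars) (0, 1, 0)

-- B's reset of (minute, used) when a new group arrives at minute a
def normB (a : Int) (p : Int × Int) : Int × Int := if p.1 < a then (a, 0) else p

-- running B's inner loop over a whole queue of groups
def settleQ (n b : Int) (q : List (Int × Int)) (st : Int × Int × Int) : Int × Int × Int :=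
  q.foldl (fun st p => serveB n b p.1 p.2 st.2.1 st.2.2 st.1) st

lemma func_eq_foldA (n b : Int) (ars : List Int) :
    func n b ars = (foldA b ars n).1.foldl (fun acc p => acc + p.2 * (n + 2 - p.1)) (foldA b ars n).2 := rfl

lemma func_alt_eq_foldB (n b : Int) (ars : List Int) : func_alt n b ars = (foldB n b ars n).1 := rfl

lemma normB_comp (a : Int) (p : Int × Int) : normB (a + 1) (normB a p) = normB (a + 1) p := by
  unfold normB; split_ifs with h1 h2 h2 <;> simp_all <;> omega

lemma normB_eq_self {a : Int} {p : Int × Int} (h : a ≤ p.1) : normB a p = p := by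
  unfold normB; split_ifs with h1 <;> [omega; rfl]

lemma serveB_minute_le (n b a c minute used total : Int) :
    minute ≤ (serveB n b a c minute used total).2.1 := by
  fun_induction serveB <;> simp_all <;> omega

lemma settleQ_minute_le (n b : Int) (q : List (Int × Int)) :
    ∀ st : Int × Int × Int, st.2.1 ≤ (settleQ n b q st).2.1 := by
  induction q with
  | nil => intro st; simp [settleQ]
  | cons p rest ih =>
    intro st
    have h1 := serveB_minute_le n b p.1 p.2 st.2.1 st.2.2 st.1
    have h2 := ih (serveB n b p.1 p.2 st.2.1 st.2.2 st.1)
    simpa [settleQ] using le_trans h1 h2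

-- when no service capacity is left (b ≤ 0 or minute past n), settling only dumps
lemma settle_dump (n b m u : Int) (h : b ≤ 0 ∨ n < m) :
    ∀ (q : List (Int × Int)) (T : Int), (∀ p ∈ q, 1 ≤ p.2) →
    settleQ n b q (T, m, u) = (q.foldl (fun acc p => acc + p.2 * (n + 2 - p.1)) T, m, u) := by
  intro q
  induction q with
  | nil => intro T _; simp [settleQ]
  | cons p rest ih =>
    intro T hq
    have hc : 0 < p.2 := by have := hq p (by simp); omega
    have hstep : serveB n b p.1 p.2 m u T = (T + p.2 * (n + 2 - p.1), m, u) := by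
      rw [serveB]
      simp only [dif_pos hc]
      rw [if_pos (by omega)]
    simp only [settleQ, List.foldl_cons] at *
    rw [hstep]
    exact ih (T + p.2 * (n + 2 - p.1)) (fun p hp => hq p (by simp [hp]))

lemma serveA_of_not_lt (b mn : Int) (q : List (Int × Int)) (s T : Int) (h : ¬ s < b) :
    serveA b mn q s T = (q, T) := by
  cases q with
  | nil => rfl
  | cons p rest => obtain ⟨e, c⟩ := p; simp [serveA, h]

-- core commutation: serving one minute in A, then settling the remaining queue one
-- minute later, is the same as settling the whole queue now
lemma commute (n b : Int) (q : List (Int × Int)) : ∀ (T s : Int) (a : Int),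
    0 ≤ s → (0 < b → s < b) → (b ≤ 0 → s = 0) → a ≤ n →
    (∀ p ∈ q, 1 ≤ p.1 ∧ p.1 ≤ a ∧ 1 ≤ p.2) →
    settleQ n b (serveA b (a - 1) q s T).1 ((serveA b (a - 1) q s T).2, a + 1, 0)
        = ((settleQ n b q (T, a, s)).1, normB (a + 1) (settleQ n b q (T, a, s)).2)
    ∧ (∀ p ∈ (serveA b (a - 1) q s T).1, 1 ≤ p.1 ∧ p.1 ≤ a ∧ 1 ≤ p.2) := by
  induction q with
  | nil =>
    intro T s a _ _ _ _ _
    simp only [serveA, settleQ, List.foldl_nil, normB, if_pos (show a < a + 1 by omega)]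
    simp
  | cons p rest ih =>
    intro T s a hs0 hsb hb0 han hwf
    obtain ⟨e, c⟩ := p
    obtain ⟨he1, hea, hc1⟩ := hwf (e, c) (by simp)
    by_cases hb : 0 < b
    · have hsb' : s < b := hsb hb
      -- one unfolding of A's inner loop
      have ht1 : 1 ≤ min c (b - s) := by omega
      have htc : min c (b - s) ≤ c := by omega
      -- one unfolding of B's inner loop on the head group
      have hserveB : serveB n b e c a s T =
          (if s + min c (b - s) = b
            then serveB n b e (c - min c (b - s)) (a + 1) 0 (T + min c (b - s) * (a + 1 - e))
            else serveB n b e (c - min c (b - s)) a (s + min c (b - s)) (T + min c (b - s) * (a + 1 - e))) := by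
        rw [serveB]
        simp only [dif_pos (by omega : (0:Int) < c)]
        rw [if_neg (by omega)]
        simp only [dif_pos (by omega : (0:Int) < min c (b - s))]
      have harith : ∀ x : Int, x * (a - 1 + 2 - e) = x * (a + 1 - e) := fun x => by ring
      by_cases hct : c > min c (b - s)
      · -- head not exhausted: minute fills up (t = b - s), A re-queues the remainder
        have ht : min c (b - s) = b - s := by omega
        have hA : serveA b (a - 1) ((e, c) :: rest) s T =
            ((e, c - min c (b - s)) :: rest, T + min c (b - s) * (a + 1 - e)) := by
          simp only [serveA, if_pos hsb']
          rw [if_pos hct, harith]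
        have hB : settleQ n b ((e, c) :: rest) (T, a, s) =
            settleQ n b ((e, c - min c (b - s)) :: rest) (T + min c (b - s) * (a + 1 - e), a + 1, 0) := by
          simp only [settleQ, List.foldl_cons]
          rw [hserveB, if_pos (by omega)]
        constructor
        · rw [hA, hB]
          have := settleQ_minute_le n b ((e, c - min c (b - s)) :: rest)
            (T + min c (b - s) * (a + 1 - e), a + 1, 0)
          rw [normB_eq_self (by simpa using this)]
        · rw [hA]
          intro p hp
          rcases List.mem_cons.mp hp with h | h
          · subst h; refine ⟨he1, hea, by omega⟩
          · exact hwf p (by simp [h])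
      · -- head exhausted this minute: t = c
        have ht : min c (b - s) = c := by omega
        have hscb : s + c ≤ b := by omega
        have hA : serveA b (a - 1) ((e, c) :: rest) s T =
            serveA b (a - 1) rest (s + min c (b - s)) (T + min c (b - s) * (a + 1 - e)) := by
          simp only [serveA, if_pos hsb']
          rw [if_neg hct, harith]
        have hwfrest : ∀ p ∈ rest, 1 ≤ p.1 ∧ p.1 ≤ a ∧ 1 ≤ p.2 := fun p hp => hwf p (by simp [hp])
        by_cases hfull : s + min c (b - s) = b
        · -- minute exactly filled: A's loop exits with queue = rest
          have hA2 : serveA b (a - 1) rest (s + min c (b - s)) (T + min c (b - s) * (a + 1 - e))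
              = (rest, T + min c (b - s) * (a + 1 - e)) :=
            serveA_of_not_lt _ _ _ _ _ (by omega)
          have hB : settleQ n b ((e, c) :: rest) (T, a, s) =
              settleQ n b rest (T + min c (b - s) * (a + 1 - e), a + 1, 0) := by
            simp only [settleQ, List.foldl_cons]
            rw [hserveB, if_pos hfull]
            rw [serveB]
            simp only [ht]
            rw [dif_neg (by omega)]
          constructor
          · rw [hA, hA2, hB]
            have := settleQ_minute_le n b rest (T + min c (b - s) * (a + 1 - e), a + 1, 0)
            rw [normB_eq_self (by simpa using this)]
          · rw [hA, hA2]; exact hwfrest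
        · -- minute not yet full: continue with the rest (induction hypothesis)
          have hB : settleQ n b ((e, c) :: rest) (T, a, s) =
              settleQ n b rest (T + min c (b - s) * (a + 1 - e), a, s + min c (b - s)) := by
            simp only [settleQ, List.foldl_cons]
            rw [hserveB, if_neg hfull]
            rw [serveB]
            simp only [ht]
            rw [dif_neg (by omega)]
          have := ih (T + min c (b - s) * (a + 1 - e)) (s + min c (b - s)) a
            (by omega) (fun _ => by omega) (fun h => absurd h (by omega)) han hwfrest
          rw [hA, hB]
          exact this
    · -- b ≤ 0: nobody is ever served; settling only dumps on both sides
      have hs : s = 0 := hb0 (by omega)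
      have hA : serveA b (a - 1) ((e, c) :: rest) s T = ((e, c) :: rest, T) :=
        serveA_of_not_lt _ _ _ _ _ (by omega)
      have hcnt : ∀ p ∈ (e, c) :: rest, 1 ≤ p.2 := fun p hp => (hwf p hp).2.2
      rw [hA, settle_dump n b (a + 1) 0 (by omega) _ _ hcnt,
          hs, settle_dump n b a 0 (by omega) _ _ hcnt]
      refine ⟨?_, hwf⟩
      simp only [normB, if_pos (show a < a + 1 by omega)]


-- simulation invariant: after m minutes, settling A's queue from the next minute
-- yields B's accumulated total, and B's (minute, used) up to the arrival reset
lemma main_inv (n b : Int) (ars : List Int) : ∀ (m : Nat), (m : Int) ≤ n →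
    settleQ n b (foldA b ars (m : Int)).1 ((foldA b ars (m : Int)).2, (m : Int) + 1, 0)
        = ((foldB n b ars (m : Int)).1, normB ((m : Int) + 1) (foldB n b ars (m : Int)).2)
    ∧ (∀ p ∈ (foldA b ars (m : Int)).1, 1 ≤ p.1 ∧ p.1 ≤ (m : Int) ∧ 1 ≤ p.2) := by
  intro m
  induction m with
  | zero =>
    intro _
    refine ⟨?_, by simp [foldA, PySem.List.pyRange_one_eq_nil]⟩
    simp [foldA, foldB, settleQ, normB, PySem.List.pyRange_one_eq_nil]
  | succ m ih =>
    intro hm1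
    have hmn : (m : Int) < n := by push_cast at hm1; omega
    obtain ⟨hset, hwf⟩ := ih (by omega)
    have hsplit : PySem.List.pyRange 0 ((m : Int) + 1) 1
        = PySem.List.pyRange 0 (m : Int) 1 ++ [(m : Int)] :=
      PySem.List.pyRange_one_succ_right (by positivity)
    have hfA : foldA b ars ((m : Int) + 1) = stepA b ars (foldA b ars (m : Int)) (m : Int) := by
      rw [foldA, hsplit, List.foldl_append]; rfl
    have hfB : foldB n b ars ((m : Int) + 1) = stepB n b ars (foldB n b ars (m : Int)) (m : Int) := by
      rw [foldB, hsplit, List.foldl_append]; rfl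
    have hcast : ((m + 1 : Nat) : Int) = (m : Int) + 1 := by push_cast; ring
    rw [hcast, hfA, hfB]
    set A := foldA b ars (m : Int) with hA
    set B := foldB n b ars (m : Int) with hB
    set c := (PySem.List.pyGet? ars (m : Int)).getD 0 with hc
    have hm1sub : (m : Int) + 1 - 1 = (m : Int) := by ring
    by_cases hcpos : c > 0
    · -- a group arrives at minute m+1
      have hq1wf : ∀ p ∈ A.1 ++ [((m : Int) + 1, c)], 1 ≤ p.1 ∧ p.1 ≤ (m : Int) + 1 ∧ 1 ≤ p.2 := by
        intro p hp
        rcases List.mem_append.mp hp with h | h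
        · have := hwf p h; exact ⟨this.1, by omega, this.2.2⟩
        · simp at h; subst h; exact ⟨by omega, by omega, by omega⟩
      have hstepA : stepA b ars A (m : Int)
          = serveA b ((m : Int) + 1 - 1) (A.1 ++ [((m : Int) + 1, c)]) 0 A.2 := by
        rw [hm1sub]; simp only [stepA, ← hc, if_pos hcpos]
      have hstepB : stepB n b ars B (m : Int)
          = serveB n b ((m : Int) + 1) c (normB ((m : Int) + 1) B.2).1 (normB ((m : Int) + 1) B.2).2 B.1 := by
        simp only [stepB, ← hc, if_neg (by omega : ¬ c ≤ 0), normB]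
        split_ifs <;> rfl
      have hsettle1 : settleQ n b (A.1 ++ [((m : Int) + 1, c)]) (A.2, (m : Int) + 1, 0)
          = serveB n b ((m : Int) + 1) c (normB ((m : Int) + 1) B.2).1 (normB ((m : Int) + 1) B.2).2 B.1 := by
        rw [settleQ, List.foldl_append]
        rw [show List.foldl (fun st p => serveB n b p.1 p.2 st.2.1 st.2.2 st.1) (A.2, (m : Int) + 1, 0) A.1
              = settleQ n b A.1 (A.2, (m : Int) + 1, 0) from rfl, hset]
        rfl
      obtain ⟨h1, h2⟩ := commute n b (A.1 ++ [((m : Int) + 1, c)]) A.2 0 ((m : Int) + 1)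
        le_rfl (fun _ => by omega) (fun _ => rfl) (by omega) hq1wf
      rw [hstepA, hstepB]
      rw [hsettle1] at h1
      exact ⟨by rw [h1], h2⟩
    · -- no arrival this minute: A still serves, B's state is unchanged
      have hstepA : stepA b ars A (m : Int) = serveA b ((m : Int) + 1 - 1) A.1 0 A.2 := by
        rw [hm1sub]; simp only [stepA, ← hc, if_neg (by omega : ¬ c > 0)]
      have hstepB : stepB n b ars B (m : Int) = B := by
        simp only [stepB, ← hc, if_pos (by omega : c ≤ 0)]
      obtain ⟨h1, h2⟩ := commute n b A.1 A.2 0 ((m : Int) + 1)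
        le_rfl (fun _ => by omega) (fun _ => rfl) (by omega)
        (fun p hp => ⟨(hwf p hp).1, by have := (hwf p hp).2.1; omega, (hwf p hp).2.2⟩)
      rw [hstepA, hstepB]
      rw [hset, show ((B.1, normB ((m : Int) + 1) B.2) : Int × Int × Int).1 = B.1 from rfl,
          show ((B.1, normB ((m : Int) + 1) B.2) : Int × Int × Int).2 = normB ((m : Int) + 1) B.2 from rfl,
          normB_comp] at h1
      exact ⟨h1, fun p hp => ⟨(h2 p hp).1, (h2 p hp).2.1, (h2 p hp).2.2⟩⟩

-- ===== VERDICT (by name: the statement is the Claim_ definition above) =====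
theorem func_spec : Claim_equal_func := by
  unfold Claim_equal_func Spec_func
  intro n b ars _ _
  rw [func_eq_foldA, func_alt_eq_foldB]
  by_cases hn : 0 ≤ n
  · obtain ⟨hset, hwf⟩ := main_inv n b ars n.toNat (by omega)
    rw [Int.toNat_of_nonneg hn] at hset hwf
    rw [settle_dump n b (n + 1) 0 (by omega) _ _ (fun p hp => (hwf p hp).2.2)] at hset
    have := congrArg Prod.fst hset
    simpa using this
  · simp [foldA, foldB, PySem.List.pyRange_one_eq_nil (by omega : n ≤ 0)]
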